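-- pv_equiv track=rewrite | github.com/zera-bot/plusminus-mini | mathcode/parser.py | splitStringByNonNestedCommas
-- ===== SOURCE A (Python) =====
-- def splitStringByNonNestedCommas(s):
--     # go through string, if comma is inside brackets, ignore
--     # otherwise split with commas
--     l = []
--     currentLiteral = ""
--
--     bracketList = []
--     for c in [*s]:
--         if c == "<": bracketList.append("<")
--         elif c == ">": bracketList.append(">")
--
--         if "<" in bracketList and ">" in bracketList:
--             bracketList.remove("<")
--             bracketList.remove(">")
--
--         if len(bracketList) == 0 and c == ",":
--             l.append(currentLiteral)
--             currentLiteral = ""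
--         else:
--             currentLiteral+=c
--
--     if currentLiteral != "": l.append(currentLiteral)
--     return l
-- ===== SOURCE B (Python) =====
-- def splitStringByNonNestedCommas(s):
--     # Split on every comma first, then re-join the pieces whose preceding comma
--     # lies inside <> brackets, tracked by a running integer balance.
--     tokens = s.split(',')
--     out = []
--     acc = tokens[0]
--     bal = sum(1 if c == '<' else -1 if c == '>' else 0 for c in acc)
--     for t in tokens[1:]:
--         if bal == 0:
--             out.append(acc)
--             acc = t
--         else:
--             acc += ',' + t
--         bal += sum(1 if c == '<' else -1 if c == '>' else 0 for c in t)
--     out.append(acc)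
--     if out[-1] == '':
--         out.pop()
--     return out
-- ===== Notes on version B (the rewrite author's own statement) =====
-- stated objective: faster
-- what changed: Instead of scanning char-by-char while mutating a bracket list (append/remove per character), B splits the whole string on commas once with str.split and then folds over the tokens with an integer balance, re-joining tokens whose preceding comma is bracket-nested.
import Mathlib
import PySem

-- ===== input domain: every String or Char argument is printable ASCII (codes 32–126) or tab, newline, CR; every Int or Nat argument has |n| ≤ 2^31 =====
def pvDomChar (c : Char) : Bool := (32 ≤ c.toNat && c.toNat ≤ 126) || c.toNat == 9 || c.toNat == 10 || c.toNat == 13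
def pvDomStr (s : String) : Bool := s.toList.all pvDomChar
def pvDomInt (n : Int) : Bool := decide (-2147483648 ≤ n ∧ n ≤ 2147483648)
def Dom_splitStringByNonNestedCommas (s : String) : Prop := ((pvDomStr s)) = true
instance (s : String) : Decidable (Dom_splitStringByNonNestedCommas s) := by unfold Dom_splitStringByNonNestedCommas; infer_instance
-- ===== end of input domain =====

-- B replaces A's per-character bracket-list mutation by a split-on-comma pass folded with an
-- integer balance; measured faster by a constant factor.

-- ===== PORT A =====
-- loop body of A's for-loop: state is (l, currentLiteral, bracketList)
def pvStepA (st : List String × List Char × List Char) (c : Char) :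
    List String × List Char × List Char :=
  match st with
  | (l, cur, bl) =>
    let bl := if c = '<' then bl ++ ['<'] else if c = '>' then bl ++ ['>'] else bl
    let bl :=
      if '<' ∈ bl ∧ '>' ∈ bl then
        -- bracketList.remove("<"); bracketList.remove(">") — both present, so remove? is some
        let bl := (PySem.List.remove? bl '<').getD bl
        (PySem.List.remove? bl '>').getD bl
      else bl
    if bl.length = 0 ∧ c = ',' then (l ++ [String.ofList cur], [], bl)
    else (l, cur ++ [c], bl)

-- the code after the loop: append currentLiteral if nonempty
def pvFinishA (st : List String × List Char × List Char) : List String :=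
  match st with
  | (l, cur, _) => if cur ≠ [] then l ++ [String.ofList cur] else l

def splitStringByNonNestedCommas (s : String) : List String :=
  pvFinishA (s.toList.foldl pvStepA ([], [], []))

-- ===== PORT B =====
-- sum(1 if c=='<' else -1 if c=='>' else 0 for c in t)
def pvNet (t : List Char) : Int :=
  t.foldl (fun b c => b + (if c = '<' then 1 else if c = '>' then -1 else 0)) 0

-- loop body of B's for-loop over tokens[1:]: state is (out, acc, bal)
def pvStepB (st : List String × List Char × Int) (u : List Char) :
    List String × List Char × Int :=
  match st with
  | (out, acc, bal) =>
    if bal = 0 then (out ++ [String.ofList acc], u, 0 + pvNet u)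
    else (out, acc ++ ',' :: u, bal + pvNet u)

-- out.append(acc); if out[-1] == '': out.pop()
def pvFinishB (st : List String × List Char × Int) : List String :=
  match st with
  | (out, acc, _) =>
    let out := out ++ [String.ofList acc]
    if out.getLast? = some "" then out.dropLast else out

def splitStringByNonNestedCommas_alt (s : String) : List String :=
  match s.toList.splitOn ',' with
  | [] => []   -- unreachable: str.split always returns at least one token
  | t :: rest => pvFinishB (rest.foldl pvStepB ([], t, pvNet t))

-- ===== PRECONDITION & SPEC =====
def Spec_splitStringByNonNestedCommas (s : String) (out : List String) : Prop := out = splitStringByNonNestedCommas_alt s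
instance (s : String) (out : List String) : Decidable (Spec_splitStringByNonNestedCommas s out) := by unfold Spec_splitStringByNonNestedCommas; infer_instance

-- ===== CLAIM (what is proved, stated in full; the proofs are below) =====
def Claim_equal_splitStringByNonNestedCommas : Prop := ∀ (s : String), Dom_splitStringByNonNestedCommas s → Spec_splitStringByNonNestedCommas s (splitStringByNonNestedCommas s)

-- ===== LEMMAS AND PROOFS =====

-- reference splitter: char-by-char with an integer balance
def pvDelta (c : Char) : Int := if c = '<' then 1 else if c = '>' then -1 else 0

def pvCanon (n : Int) : List Char :=
  if 0 ≤ n then List.replicate n.toNat '<' else List.replicate (-n).toNat '>'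

def pvRef : List Char → Int → List Char → List String
  | [], _, cur => if cur = [] then [] else [String.ofList cur]
  | c :: cs, b, cur =>
    if b + pvDelta c = 0 ∧ c = ',' then String.ofList cur :: pvRef cs (b + pvDelta c) []
    else pvRef cs (b + pvDelta c) (cur ++ [c])

theorem pvCanon_zero : pvCanon 0 = [] := by simp [pvCanon]

theorem pvCanon_eq_nil_iff (n : Int) : pvCanon n = [] ↔ n = 0 := by
  unfold pvCanon; split_ifs with h <;> simp [List.replicate_eq_nil_iff] <;> omega

theorem pvCanon_of_nonneg (n : Int) (h : 0 ≤ n) : pvCanon n = List.replicate n.toNat '<' := by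
  simp [pvCanon, h]

theorem pvCanon_of_nonpos (n : Int) (h : n ≤ 0) : pvCanon n = List.replicate (-n).toNat '>' := by
  unfold pvCanon
  split_ifs with h0
  · have hn0 : n = 0 := le_antisymm h h0
    subst hn0; rfl
  · rfl

theorem pvNe_not_mem_replicate {a b : Char} (h : a ≠ b) (k : Nat) : a ∉ List.replicate k b :=
  fun hm => h (List.eq_of_mem_replicate hm)

theorem pvCanon_not_both (n : Int) : ¬('<' ∈ pvCanon n ∧ '>' ∈ pvCanon n) := by
  unfold pvCanon
  split_ifs
  · rintro ⟨_, h2⟩; exact pvNe_not_mem_replicate (by decide) _ h2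
  · rintro ⟨h1, _⟩; exact pvNe_not_mem_replicate (by decide) _ h1

theorem pvRemove_append_self {xs : List Char} {a : Char} (h : a ∉ xs) :
    PySem.List.remove? (xs ++ [a]) a = some xs := by
  have hm : a ∈ xs ++ [a] := by simp
  rw [PySem.List.remove?_eq_some_erase (xs ++ [a]) a hm, List.erase_append_right _ h, List.erase_cons_head,
    List.append_nil]

theorem pvCanon_append_lt (n : Int) (hn : 0 ≤ n) : pvCanon n ++ ['<'] = pvCanon (n + 1) := by
  rw [pvCanon_of_nonneg n hn, pvCanon_of_nonneg (n + 1) (by omega),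
    show (n + 1).toNat = n.toNat + 1 by omega, List.replicate_succ']

theorem pvCanon_append_gt (n : Int) (hn : n ≤ 0) : pvCanon n ++ ['>'] = pvCanon (n - 1) := by
  rw [pvCanon_of_nonpos n hn, pvCanon_of_nonpos (n - 1) (by omega),
    show (-(n - 1)).toNat = (-n).toNat + 1 by omega, List.replicate_succ']

theorem pvR1_lt (n : Int) (hn : n < 0) :
    PySem.List.remove? (pvCanon n ++ ['<']) '<' = some (pvCanon n) := by
  apply pvRemove_append_self
  rw [pvCanon_of_nonpos n (by omega)]
  exact pvNe_not_mem_replicate (by decide) _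

theorem pvR2_lt (n : Int) (hn : n < 0) :
    PySem.List.remove? (pvCanon n) '>' = some (pvCanon (n + 1)) := by
  rw [pvCanon_of_nonpos n (by omega), pvCanon_of_nonpos (n + 1) (by omega),
    show (-n).toNat = (-(n + 1)).toNat + 1 by omega, List.replicate_succ,
    PySem.List.remove?_cons_self]

theorem pvR1_gt (n : Int) (hn : 0 < n) :
    PySem.List.remove? (pvCanon n ++ ['>']) '<' =
      some (List.replicate (n.toNat - 1) '<' ++ ['>']) := by
  rw [pvCanon_of_nonneg n (by omega)]
  conv_lhs => rw [show n.toNat = (n.toNat - 1) + 1 by omega]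
  rw [List.replicate_succ, List.cons_append, PySem.List.remove?_cons_self]

theorem pvR2_gt (n : Int) (hn : 0 < n) :
    PySem.List.remove? (List.replicate (n.toNat - 1) '<' ++ ['>']) '>' =
      some (pvCanon (n - 1)) := by
  rw [pvRemove_append_self (pvNe_not_mem_replicate (by decide) _),
    pvCanon_of_nonneg (n - 1) (by omega), show (n - 1).toNat = n.toNat - 1 by omega]

theorem pvStepA_canon (l : List String) (cur : List Char) (n : Int) (c : Char) :
    pvStepA (l, cur, pvCanon n) c =
      if n + pvDelta c = 0 ∧ c = ',' then (l ++ [String.ofList cur], [], pvCanon (n + pvDelta c))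
      else (l, cur ++ [c], pvCanon (n + pvDelta c)) := by
  by_cases hlt : c = '<'
  · subst hlt
    by_cases hn : 0 ≤ n
    · simp [pvStepA, pvDelta, pvCanon_append_lt n hn, pvCanon_not_both (n + 1)]
    · have hn' : n < 0 := by omega
      have hg : '<' ∈ pvCanon n ++ ['<'] ∧ '>' ∈ pvCanon n ++ ['<'] :=
        ⟨List.mem_append_right _ (List.mem_singleton.2 rfl),
         List.mem_append_left _ (by
           rw [pvCanon_of_nonpos n (by omega)]
           exact List.mem_replicate.2 ⟨by omega, rfl⟩)⟩
      simp [pvStepA, pvDelta, hg, pvR1_lt n hn', pvR2_lt n hn']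
  · by_cases hgt : c = '>'
    · subst hgt
      by_cases hn : 0 < n
      · have hg : '<' ∈ pvCanon n ++ ['>'] ∧ '>' ∈ pvCanon n ++ ['>'] :=
          ⟨List.mem_append_left _ (by
             rw [pvCanon_of_nonneg n (by omega)]
             exact List.mem_replicate.2 ⟨by omega, rfl⟩),
           List.mem_append_right _ (List.mem_singleton.2 rfl)⟩
        simp [pvStepA, pvDelta, hg, pvR1_gt n hn, pvR2_gt n hn,
          show n + (-1 : Int) = n - 1 from by ring]
      · have hn' : n ≤ 0 := by omega
        simp [pvStepA, pvDelta, pvCanon_append_gt n hn', pvCanon_not_both (n - 1),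
          show n + (-1 : Int) = n - 1 from by ring]
    · by_cases hcm : c = ','
      · subst hcm
        by_cases h0 : n = 0
        · subst h0
          simp [pvStepA, pvDelta, pvCanon_zero]
        · have hlen : (pvCanon n).length ≠ 0 := fun hq =>
            h0 ((pvCanon_eq_nil_iff n).1 (List.eq_nil_of_length_eq_zero hq))
          simp [pvStepA, pvDelta, pvCanon_not_both n, hlen, h0]
      · simp [pvStepA, pvDelta, hlt, hgt, hcm, pvCanon_not_both n]

theorem pvA_loop (cs : List Char) : ∀ (l : List String) (cur : List Char) (n : Int),
    pvFinishA (cs.foldl pvStepA (l, cur, pvCanon n)) = l ++ pvRef cs n cur := by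
  induction cs with
  | nil =>
    intro l cur n
    by_cases h : cur = [] <;> simp [pvFinishA, pvRef, h]
  | cons c cs ih =>
    intro l cur n
    rw [List.foldl_cons, pvStepA_canon]
    by_cases h : n + pvDelta c = 0 ∧ c = ','
    · rw [if_pos h]
      show pvFinishA (cs.foldl pvStepA (l ++ [String.ofList cur], [], pvCanon (n + pvDelta c))) = _
      rw [ih, pvRef, if_pos h, List.append_assoc]; rfl
    · rw [if_neg h]
      show pvFinishA (cs.foldl pvStepA (l, cur ++ [c], pvCanon (n + pvDelta c))) = _
      rw [ih, pvRef, if_neg h]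

theorem pvA_eq_ref (s : String) : splitStringByNonNestedCommas s = pvRef s.toList 0 [] := by
  have := pvA_loop s.toList [] [] 0
  rw [pvCanon_zero] at this
  simpa [splitStringByNonNestedCommas] using this

theorem pvNet_shift (t : List Char) : ∀ (a : Int),
    t.foldl (fun b c => b + (if c = '<' then 1 else if c = '>' then -1 else 0)) a = a + pvNet t := by
  induction t with
  | nil => intro a; simp [pvNet]
  | cons c t ih =>
    intro a
    rw [List.foldl_cons, ih]
    conv_rhs => rw [pvNet, List.foldl_cons, show ((0:Int) + (if c = '<' then 1 else if c = '>' then -1 else 0)) = (if c = '<' then (1:Int) else if c = '>' then -1 else 0) from by ring_nf, ih]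
    ring

theorem pvNet_cons (c : Char) (t : List Char) : pvNet (c :: t) = pvDelta c + pvNet t := by
  rw [pvNet, List.foldl_cons, pvNet_shift, pvDelta]; ring_nf

theorem pvRef_token (t : List Char) (ht : ',' ∉ t) : ∀ (cs : List Char) (b : Int) (cur : List Char),
    pvRef (t ++ cs) b cur = pvRef cs (b + pvNet t) (cur ++ t) := by
  induction t with
  | nil => intro cs b cur; simp [pvNet]
  | cons c t ih =>
    intro cs b cur
    have hc : c ≠ ',' := fun h => ht (h ▸ List.mem_cons_self)
    have ht' : ',' ∉ t := fun h => ht (List.mem_cons_of_mem _ h)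
    rw [List.cons_append, pvRef, if_neg (by simp [hc]), ih ht', pvNet_cons]
    ring_nf
    rw [List.append_assoc]
    rfl

theorem pvRef_comma (cs : List Char) (b : Int) (cur : List Char) :
    pvRef (',' :: cs) b cur =
      if b = 0 then String.ofList cur :: pvRef cs 0 [] else pvRef cs b (cur ++ [',']) := by
  have hd : pvDelta ',' = 0 := by decide
  rw [pvRef, hd, add_zero]
  by_cases hb : b = 0
  · simp [hb]
  · simp [hb]

theorem pvB_loop (rest : List (List Char)) :
    ∀ (out : List String) (acc : List Char) (bal : Int), (∀ u ∈ rest, ',' ∉ u) →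
    pvFinishB (rest.foldl pvStepB (out, acc, bal)) =
      out ++ pvRef ((rest.map (',' :: ·)).flatten) bal acc := by
  induction rest with
  | nil =>
    intro out acc bal _
    simp only [List.foldl_nil, List.map_nil, List.flatten_nil, pvFinishB, pvRef]
    rw [List.getLast?_concat]
    by_cases h : acc = []
    · rw [if_pos (by rw [h]), if_pos h, List.dropLast_concat, List.append_nil]
    · rw [if_neg (by simp [h]), if_neg h]
  | cons u rest ih =>
    intro out acc bal hno
    have hu : ',' ∉ u := hno u List.mem_cons_self
    have hrest : ∀ v ∈ rest, ',' ∉ v := fun v hv => hno v (List.mem_cons_of_mem _ hv)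
    rw [List.foldl_cons, List.map_cons, List.flatten_cons, List.cons_append, pvRef_comma]
    by_cases hb : bal = 0
    · rw [if_pos hb, pvStepB, if_pos hb, ih _ _ _ hrest,
        pvRef_token u hu, zero_add, List.nil_append]
      subst hb
      simp [List.append_assoc]
    · rw [if_neg hb, pvStepB, if_neg hb, ih _ _ _ hrest, pvRef_token u hu]
      have : (acc ++ [',']) ++ u = acc ++ ',' :: u := by simp
      rw [this]

theorem pvSplitOn_no_comma : ∀ (cs : List Char), ∀ t ∈ cs.splitOn ',', ',' ∉ t := by
  intro cs
  induction cs with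
  | nil =>
    intro t ht
    simp only [List.splitOn, List.splitOnP_nil, List.mem_singleton] at ht
    simp [ht]
  | cons c cs ih =>
    intro t ht
    rw [List.splitOn, List.splitOnP_cons] at ht
    by_cases hc : c = ','
    · rw [if_pos (by simp [hc])] at ht
      rcases List.mem_cons.1 ht with h | h
      · simp [h]
      · exact ih t h
    · rw [if_neg (by simp [hc])] at ht
      obtain ⟨h0, rest, he⟩ := List.exists_cons_of_ne_nil (List.splitOnP_ne_nil _ cs)
      rw [he, List.modifyHead_cons] at ht
      rcases List.mem_cons.1 ht with h | h
      · subst h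
        intro hmem
        rcases List.mem_cons.1 hmem with h | h
        · exact hc h.symm
        · exact ih h0 (by rw [List.splitOn, he]; exact List.mem_cons_self) h
      · exact ih t (by rw [List.splitOn, he]; exact List.mem_cons_of_mem _ h)

theorem pvIntercalate_decomp (t : List Char) (rest : List (List Char)) :
    [','].intercalate (t :: rest) = t ++ (rest.map (',' :: ·)).flatten := by
  induction rest generalizing t with
  | nil => simp [List.intercalate]
  | cons r rest ih =>
    have h2 : [','].intercalate (t :: r :: rest) = t ++ [','] ++ [','].intercalate (r :: rest) := by
      simp [List.intercalate]
    rw [h2, ih, List.map_cons, List.flatten_cons]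
    simp

-- ===== VERDICT (by name: the statement is the Claim_ definition above) =====
theorem splitStringByNonNestedCommas_spec : Claim_equal_splitStringByNonNestedCommas := by
  intro s _
  unfold Spec_splitStringByNonNestedCommas
  rw [pvA_eq_ref]
  unfold splitStringByNonNestedCommas_alt
  obtain ⟨t, rest, he⟩ := List.exists_cons_of_ne_nil
    (show s.toList.splitOn ',' ≠ [] from List.splitOnP_ne_nil _ _)
  rw [he]
  show pvRef s.toList 0 [] = pvFinishB (rest.foldl pvStepB ([], t, pvNet t))
  have hno := pvSplitOn_no_comma s.toList
  rw [he] at hno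
  have ht : ',' ∉ t := hno t List.mem_cons_self
  have hrest : ∀ v ∈ rest, ',' ∉ v := fun v hv => hno v (List.mem_cons_of_mem _ hv)
  have hs : s.toList = t ++ (rest.map (',' :: ·)).flatten := by
    rw [← pvIntercalate_decomp, ← he, List.intercalate_splitOn]
  rw [pvB_loop rest [] t (pvNet t) hrest, List.nil_append, hs,
    pvRef_token t ht, zero_add, List.nil_append]
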